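-- pv_equiv track=rewrite | github.com/valengobet/algo1-valengobet | labos/python/practica 10/ej1_1.py | separaPalabras
-- ===== SOURCE A (Python) =====
-- def separaPalabras(linea: str) -> list[str]:
--     lista: list= []
--     i = 0
--     palabra = ""
--     while i < len(linea):
--         if linea[i] != ' ':
--             palabra = palabra + linea[i]
--             i += 1
--         else:
--             lista.append(palabra)
--             palabra = ""
--             i += 1
--     lista.append(palabra)
--     return lista
-- ===== SOURCE B (Python) =====
-- def separaPalabras(linea: str) -> list[str]:
--     res = []
--     start = 0
--     while True:
--         idx = linea.find(' ', start)
--         if idx == -1: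
--             res.append(linea[start:])
--             return res
--         res.append(linea[start:idx])
--         start = idx + 1
-- ===== Notes on version B (the rewrite author's own statement) =====
-- stated objective: faster
-- what changed: Replaces the per-character loop that grows a word by repeated string concatenation with a cursor that jumps from space to space via str.find and emits each segment as one slice.
import Mathlib
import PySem

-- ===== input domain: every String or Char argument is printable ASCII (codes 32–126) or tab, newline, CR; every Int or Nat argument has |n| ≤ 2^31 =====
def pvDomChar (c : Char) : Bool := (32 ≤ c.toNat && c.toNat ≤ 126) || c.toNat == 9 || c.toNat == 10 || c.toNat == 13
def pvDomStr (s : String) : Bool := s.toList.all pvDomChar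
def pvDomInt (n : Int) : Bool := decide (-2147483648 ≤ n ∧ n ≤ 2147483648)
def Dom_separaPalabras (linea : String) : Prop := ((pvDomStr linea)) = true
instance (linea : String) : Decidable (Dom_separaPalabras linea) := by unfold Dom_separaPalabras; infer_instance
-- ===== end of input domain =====

-- B replaces A's per-character word accumulation with a cursor that jumps to the next
-- space (str.find) and emits whole slices; objective: faster (no repeated concatenation).

-- ===== PORT A =====
-- A's while-loop over the characters, carrying (lista, palabra); palabra is kept as
-- List Char and turned into a String exactly where A appends it to the list.
def pvStepA (st : List String × List Char) (c : Char) : List String × List Char :=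
  if c ≠ ' ' then (st.1, st.2 ++ [c])            -- palabra = palabra + linea[i]
  else (st.1 ++ [String.ofList st.2], [])        -- lista.append(palabra); palabra = ""

def separaPalabras (linea : String) : List String :=
  let st := linea.toList.foldl pvStepA (([] : List String), ([] : List Char))
  st.1 ++ [String.ofList st.2]                   -- lista.append(palabra)

-- ===== PORT B =====
-- linea.find(' ', start) = -1  ⟺  takeWhile (· ≠ ' ') consumes the whole remainder;
-- otherwise the slice up to the space is emitted and the cursor jumps past it.
def separaPalabrasAltGo (cs : List Char) : List String :=
  if h : (cs.takeWhile (· ≠ ' ')).length = cs.length then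
    [String.ofList cs]                                -- idx == -1: append the tail, stop
  else
    String.ofList (cs.takeWhile (· ≠ ' ')) ::         -- append the slice linea[start:idx]
      separaPalabrasAltGo (cs.drop ((cs.takeWhile (· ≠ ' ')).length + 1))  -- start = idx + 1
termination_by cs.length
decreasing_by
  have hle : (cs.takeWhile (· ≠ ' ')).length ≤ cs.length :=
    (List.takeWhile_prefix _).length_le
  simp only [List.length_drop]
  omega

def separaPalabras_alt (linea : String) : List String :=
  separaPalabrasAltGo linea.toList

-- ===== PRECONDITION & SPEC =====
def Spec_separaPalabras (linea : String) (out : List String) : Prop := out = separaPalabras_alt linea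
instance (linea : String) (out : List String) : Decidable (Spec_separaPalabras linea out) := by unfold Spec_separaPalabras; infer_instance

-- ===== CLAIM (what is proved, stated in full; the proofs are below) =====
def Claim_equal_separaPalabras : Prop := ∀ (linea : String), Dom_separaPalabras linea → Spec_separaPalabras linea (separaPalabras linea)

-- ===== LEMMAS AND PROOFS =====

-- Common reference: repeated split-at-space with an explicit accumulator.
def pvSplitAcc : List Char → List Char → List String
  | acc, [] => [String.ofList acc]
  | acc, c :: cs => if c = ' ' then String.ofList acc :: pvSplitAcc [] cs
                    else pvSplitAcc (acc ++ [c]) cs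

theorem pvFoldA (cs : List Char) : ∀ (lista : List String) (acc : List Char),
    (cs.foldl pvStepA (lista, acc)).1 ++ [String.ofList (cs.foldl pvStepA (lista, acc)).2]
      = lista ++ pvSplitAcc acc cs := by
  induction cs with
  | nil => intro lista acc; simp [pvSplitAcc]
  | cons c cs ih =>
    intro lista acc
    by_cases h : c = ' '
    · rw [List.foldl_cons,
        show pvStepA (lista, acc) c = (lista ++ [String.ofList acc], []) by
          simp [pvStepA, h],
        ih]
      simp [pvSplitAcc, h]
    · rw [List.foldl_cons,
        show pvStepA (lista, acc) c = (lista, acc ++ [c]) by simp [pvStepA, h],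
        ih]
      simp [pvSplitAcc, h]

theorem pvSplitAcc_nospace (cs : List Char) : ∀ (acc : List Char),
    (∀ c ∈ cs, c ≠ ' ') → pvSplitAcc acc cs = [String.ofList (acc ++ cs)] := by
  induction cs with
  | nil => intro acc _; simp [pvSplitAcc]
  | cons c cs ih =>
    intro acc h
    have hc : c ≠ ' ' := h c (by simp)
    simp only [pvSplitAcc, if_neg hc]
    rw [ih _ (fun d hd => h d (by simp [hd]))]
    simp

theorem pvSplitAcc_space (w : List Char) : ∀ (rest acc : List Char),
    (∀ c ∈ w, c ≠ ' ') →
    pvSplitAcc acc (w ++ ' ' :: rest) = String.ofList (acc ++ w) :: pvSplitAcc [] rest := by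
  induction w with
  | nil => intro rest acc _; simp [pvSplitAcc]
  | cons c w ih =>
    intro rest acc h
    have hc : c ≠ ' ' := h c (by simp)
    simp only [List.cons_append, pvSplitAcc, if_neg hc]
    rw [ih _ _ (fun d hd => h d (by simp [hd]))]
    simp

theorem pvTakeWhile_nospace (cs : List Char) :
    ∀ c ∈ cs.takeWhile (fun c => decide (c ≠ ' ')), c ≠ ' ' := by
  intro c hc
  have hall := List.all_takeWhile (p := fun c => decide (c ≠ ' ')) (l := cs)
  rw [List.all_eq_true] at hall
  simpa using hall c hc

theorem pvAltGo_eq (cs : List Char) : separaPalabrasAltGo cs = pvSplitAcc [] cs := by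
  fun_induction separaPalabrasAltGo cs with
  | case1 cs hlen =>
    have heq : cs.takeWhile (fun c => decide (c ≠ ' ')) = cs :=
      (List.takeWhile_prefix (l := cs) (fun c => decide (c ≠ ' '))).eq_of_length hlen
    have hns : ∀ c ∈ cs, c ≠ ' ' := fun c hc =>
      pvTakeWhile_nospace cs c (by rw [heq]; exact hc)
    rw [pvSplitAcc_nospace cs [] hns]
    simp
  | case2 cs hlen ih =>
    set t := cs.takeWhile (fun c => decide (c ≠ ' ')) with ht
    have hsplit : t ++ cs.dropWhile (fun c => decide (c ≠ ' ')) = cs :=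
      List.takeWhile_append_dropWhile
    have hlt : t.length < cs.length := by
      have hle : t.length ≤ cs.length := ht ▸ (List.takeWhile_prefix _).length_le
      omega
    have hdw : cs.dropWhile (fun c => decide (c ≠ ' ')) ≠ [] := by
      intro hnil
      have h2 := hsplit
      rw [hnil, List.append_nil] at h2
      have := congrArg List.length h2
      omega
    obtain ⟨d, rest, hd⟩ := List.exists_cons_of_ne_nil hdw
    have hdsp : d = ' ' := by
      have h3 := List.head?_dropWhile_not (fun c => decide (c ≠ ' ')) cs
      rw [hd] at h3
      simpa using h3
    have hcs : cs = t ++ ' ' :: rest := by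
      conv_lhs => rw [← hsplit, hd, hdsp]
    have hdrop : cs.drop (t.length + 1) = rest := by
      conv_lhs => rw [hcs]
      rw [List.drop_append]
      simp
    rw [hdrop] at ih
    rw [hdrop, ih]
    conv_rhs => rw [hcs]
    rw [pvSplitAcc_space t rest [] (fun c hc => pvTakeWhile_nospace cs c (ht ▸ hc))]
    simp

-- ===== VERDICT (by name: the statement is the Claim_ definition above) =====
theorem separaPalabras_spec : Claim_equal_separaPalabras := by
  intro linea _
  unfold Spec_separaPalabras separaPalabras separaPalabras_alt
  rw [pvAltGo_eq, pvFoldA]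
  simp
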